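-- pv_equiv track=rewrite | github.com/raulnetoo/lukma_tv | lib/auth.py | _to_credentials_dict
-- ===== SOURCE A (Python) =====
-- def _to_credentials_dict(users_rows):
--     usernames = [r["username"] for r in users_rows if r.get("username")]
--     names = [r.get("full_name") or r["username"] for r in users_rows if r.get("username")]
--     pw_hashes = [r.get("password_hash","") for r in users_rows if r.get("username")]
--     return {"usernames": {
--         u: {"name": n, "password": p}
--         for u, n, p in zip(usernames, names, pw_hashes)
--     }}
-- ===== SOURCE B (Python) =====
-- def _to_credentials_dict(users_rows):
--     inner = {}
--     for r in users_rows: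
--         u = r.get("username")
--         if not u:
--             continue
--         f = r.get("full_name")
--         inner[u] = {"name": f if f else u, "password": r.get("password_hash", "")}
--     return {"usernames": inner}
-- ===== Notes on version B (the rewrite author's own statement) =====
-- stated objective: simpler
-- what changed: Replaces three filtered comprehensions plus a zip-based dict comprehension with one single pass that builds the inner dict directly row by row.
import Mathlib
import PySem

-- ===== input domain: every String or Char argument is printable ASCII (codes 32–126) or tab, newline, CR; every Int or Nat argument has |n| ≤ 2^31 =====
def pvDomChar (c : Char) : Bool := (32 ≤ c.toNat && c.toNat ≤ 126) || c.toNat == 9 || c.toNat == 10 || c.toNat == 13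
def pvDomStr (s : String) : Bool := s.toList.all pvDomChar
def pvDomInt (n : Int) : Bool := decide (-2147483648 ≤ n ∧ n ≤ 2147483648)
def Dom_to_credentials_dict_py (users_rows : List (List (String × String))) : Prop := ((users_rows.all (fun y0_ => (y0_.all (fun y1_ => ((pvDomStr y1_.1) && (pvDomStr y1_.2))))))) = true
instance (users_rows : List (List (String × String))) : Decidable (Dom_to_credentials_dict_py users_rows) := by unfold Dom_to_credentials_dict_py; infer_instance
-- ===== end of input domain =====

-- B fuses A's three filtered comprehensions + zip dict comprehension into one single pass (objective: simpler).

-- ===== PORT A =====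
-- truthiness of r.get("username"): present and non-empty
def pvGuard (r : List (String × String)) : Bool := PySem.Dict.getD (PySem.Dict.mk r) "username" "" ≠ ""

def to_credentials_dict_py (users_rows : List (List (String × String))) : List (String × List (String × List (String × String))) :=
  let usernames := (users_rows.filter pvGuard).map (fun r => PySem.Dict.getD (PySem.Dict.mk r) "username" "")
  let names := (users_rows.filter pvGuard).map (fun r =>
    let f := PySem.Dict.getD (PySem.Dict.mk r) "full_name" ""   -- r.get("full_name") or r["username"]
    if f ≠ "" then f else PySem.Dict.getD (PySem.Dict.mk r) "username" "")
  let pw_hashes := (users_rows.filter pvGuard).map (fun r => PySem.Dict.getD (PySem.Dict.mk r) "password_hash" "")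
  [("usernames",
    ((usernames.zip (names.zip pw_hashes)).foldl
      (fun d unp => PySem.Dict.insert d unp.1 [("name", unp.2.1), ("password", unp.2.2)])
      PySem.Dict.empty).items)]

-- ===== PORT B =====
def to_credentials_dict_py_alt (users_rows : List (List (String × String))) : List (String × List (String × List (String × String))) :=
  [("usernames",
    (users_rows.foldl (fun inner r =>
      let u := PySem.Dict.getD (PySem.Dict.mk r) "username" ""
      if u = "" then inner
      else
        let f := PySem.Dict.getD (PySem.Dict.mk r) "full_name" ""
        PySem.Dict.insert inner u
          [("name", if f = "" then u else f), ("password", PySem.Dict.getD (PySem.Dict.mk r) "password_hash" "")])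
      PySem.Dict.empty).items)]

-- ===== PRECONDITION & SPEC =====
def Spec_to_credentials_dict_py (users_rows : List (List (String × String))) (out : List (String × List (String × List (String × String)))) : Prop := out = to_credentials_dict_py_alt users_rows
instance (users_rows : List (List (String × String))) (out : List (String × List (String × List (String × String)))) : Decidable (Spec_to_credentials_dict_py users_rows out) := by unfold Spec_to_credentials_dict_py; infer_instance

-- ===== CLAIM (what is proved, stated in full; the proofs are below) =====
def Claim_equal_to_credentials_dict_py : Prop := ∀ (users_rows : List (List (String × String))), Dom_to_credentials_dict_py users_rows → Spec_to_credentials_dict_py users_rows (to_credentials_dict_py users_rows)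

-- ===== LEMMAS AND PROOFS =====
lemma pv_fold_eq (l : List (List (String × String)))
    (d : PySem.Dict String (List (String × String))) :
    ((((l.filter pvGuard).map (fun r => PySem.Dict.getD (PySem.Dict.mk r) "username" "")).zip
      (((l.filter pvGuard).map (fun r =>
          let f := PySem.Dict.getD (PySem.Dict.mk r) "full_name" ""
          if f ≠ "" then f else PySem.Dict.getD (PySem.Dict.mk r) "username" "")).zip
       ((l.filter pvGuard).map (fun r => PySem.Dict.getD (PySem.Dict.mk r) "password_hash" "")))).foldl
      (fun d unp => PySem.Dict.insert d unp.1 [("name", unp.2.1), ("password", unp.2.2)]) d)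
    = l.foldl (fun inner r =>
        let u := PySem.Dict.getD (PySem.Dict.mk r) "username" ""
        if u = "" then inner
        else
          let f := PySem.Dict.getD (PySem.Dict.mk r) "full_name" ""
          PySem.Dict.insert inner u
            [("name", if f = "" then u else f), ("password", PySem.Dict.getD (PySem.Dict.mk r) "password_hash" "")]) d := by
  induction l generalizing d with
  | nil => rfl
  | cons r t ih =>
    by_cases hg : pvGuard r
    · have hu : ¬ (PySem.Dict.getD (PySem.Dict.mk r) "username" "" = "") := by
        simpa [pvGuard] using hg
      simp only [List.filter_cons, hg, if_pos, List.map_cons, List.zip_cons_cons,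
        List.foldl_cons, ih, hu]
      congr 1
      by_cases hf : PySem.Dict.getD (PySem.Dict.mk r) "full_name" "" = "" <;> simp [hf]
    · have hu : PySem.Dict.getD (PySem.Dict.mk r) "username" "" = "" := by
        by_contra h; exact hg (by simpa [pvGuard] using h)
      rw [List.filter_cons_of_neg (by simpa using hg), ih d, List.foldl_cons]
      simp [hu]

-- ===== VERDICT (by name: the statement is the Claim_ definition above) =====
theorem to_credentials_dict_py_spec : Claim_equal_to_credentials_dict_py := by
  intro users_rows _
  unfold Spec_to_credentials_dict_py to_credentials_dict_py to_credentials_dict_py_alt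
  simp only []
  rw [pv_fold_eq]
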